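-- pv_equiv track=rewrite | github.com/aisspr/leetcode | GCA/mock1.py | maxSubarraySumWithPositive
-- ===== SOURCE A (Python) =====
-- def maxSubarraySumWithPositive(arr):
--     max_sum = 0
--     current_sum = 0
--     has_positive = False
--
--
--     if not arr:
--         return 0
--
--     left, right = 0, len(arr)-1
--
--     for el in arr:
--         if el > 0:
--             has_positive = True
--         current_sum += el
--         if current_sum < 0:
--             current_sum = 0
--         max_sum = max(current_sum, max_sum)
--     if has_positive:
--         return max_sum
--     else:
--         return 0
-- ===== SOURCE B (Python) =====
-- def maxSubarraySumWithPositive(arr):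
--     prefix = 0
--     min_prefix = 0
--     best = 0
--     for el in arr:
--         prefix += el
--         if prefix - min_prefix > best:
--             best = prefix - min_prefix
--         if prefix < min_prefix:
--             min_prefix = prefix
--     return best
-- ===== Notes on version B (the rewrite author's own statement) =====
-- stated objective: alternative
-- what changed: Replaces Kadane's resetting current-sum accumulator plus the (redundant) has_positive flag and empty-list guard with a prefix-sum scan maintaining the running minimum prefix; the 0-floor falls out of the initial state instead of guards.
import Mathlib
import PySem

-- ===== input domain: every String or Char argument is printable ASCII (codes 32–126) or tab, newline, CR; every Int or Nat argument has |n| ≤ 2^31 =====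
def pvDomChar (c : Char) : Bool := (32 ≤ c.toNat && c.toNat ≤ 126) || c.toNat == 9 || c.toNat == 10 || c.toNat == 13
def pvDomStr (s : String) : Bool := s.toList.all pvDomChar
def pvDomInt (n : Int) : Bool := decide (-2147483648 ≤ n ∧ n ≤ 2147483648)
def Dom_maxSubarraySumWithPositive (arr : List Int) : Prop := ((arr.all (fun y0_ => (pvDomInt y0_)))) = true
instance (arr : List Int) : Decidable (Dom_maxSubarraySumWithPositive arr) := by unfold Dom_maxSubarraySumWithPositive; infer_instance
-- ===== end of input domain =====

-- B replaces Kadane's resetting accumulator + redundant has_positive flag with a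
-- minimum-prefix-sum scan; alternative decomposition, same O(n) cost.


-- ===== PORT A =====
-- state: (max_sum, current_sum, has_positive); the unused `left, right` bindings of A are dead code and omitted
def pvStepA (st : Int × Int × Bool) (el : Int) : Int × Int × Bool :=
  let h := if el > 0 then true else st.2.2
  let c0 := st.2.1 + el
  let c := if c0 < 0 then 0 else c0
  (max c st.1, c, h)

def maxSubarraySumWithPositive (arr : List Int) : Int :=
  if arr = [] then 0
  else
    let s := arr.foldl pvStepA (0, 0, false)
    if s.2.2 then s.1 else 0

-- ===== PORT B =====
-- state: (prefix, min_prefix, best)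
def pvStepB (st : Int × Int × Int) (el : Int) : Int × Int × Int :=
  let p := st.1 + el
  let b := if p - st.2.1 > st.2.2 then p - st.2.1 else st.2.2
  let mp := if p < st.2.1 then p else st.2.1
  (p, mp, b)

def maxSubarraySumWithPositive_alt (arr : List Int) : Int :=
  (arr.foldl pvStepB (0, 0, 0)).2.2

-- ===== PRECONDITION & SPEC =====
def Spec_maxSubarraySumWithPositive (arr : List Int) (out : Int) : Prop := out = maxSubarraySumWithPositive_alt arr
instance (arr : List Int) (out : Int) : Decidable (Spec_maxSubarraySumWithPositive arr out) := by unfold Spec_maxSubarraySumWithPositive; infer_instance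

-- ===== CLAIM (what is proved, stated in full; the proofs are below) =====
def Claim_equal_maxSubarraySumWithPositive : Prop := ∀ (arr : List Int), Dom_maxSubarraySumWithPositive arr → Spec_maxSubarraySumWithPositive arr (maxSubarraySumWithPositive arr)

-- ===== LEMMAS AND PROOFS =====

-- Invariant linking A's and B's fold states: the final reported value agrees.
set_option maxHeartbeats 1000000 in
lemma pv_fold_eq : ∀ (arr : List Int) (m c : Int) (h : Bool) (p mp b : Int),
    m = b → 0 ≤ m → 0 ≤ c → c = p - mp → (h = false → m = 0 ∧ c = 0) →
    (let s := arr.foldl pvStepA (m, c, h); if s.2.2 then s.1 else 0)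
      = (arr.foldl pvStepB (p, mp, b)).2.2 := by
  intro arr
  induction arr with
  | nil =>
    intro m c h p mp b hmb hm hc hcp hflag
    cases h with
    | false => have h0 := (hflag rfl).1; simp only [List.foldl_nil]; simp; omega
    | true => simp only [List.foldl_nil]; simpa using hmb
  | cons el rest ih =>
    intro m c h p mp b hmb hm hc hcp hflag
    simp only [List.foldl_cons, pvStepA, pvStepB]
    refine ih _ _ _ _ _ _ ?_ ?_ ?_ ?_ ?_
    · simp only [max_def]; split_ifs <;> omega
    · simp only [max_def]; split_ifs <;> omega
    · split_ifs <;> omega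
    · split_ifs <;> omega
    · intro hf
      by_cases hel : el > 0
      · simp [hel] at hf
      · simp [hel] at hf
        have := hflag hf
        simp only [max_def]
        constructor <;> split_ifs <;> omega

-- ===== VERDICT (by name: the statement is the Claim_ definition above) =====
theorem maxSubarraySumWithPositive_spec : Claim_equal_maxSubarraySumWithPositive := by
  intro arr _
  unfold Spec_maxSubarraySumWithPositive maxSubarraySumWithPositive maxSubarraySumWithPositive_alt
  by_cases he : arr = []
  · subst he; simp
  · simp only [he, if_false]
    exact pv_fold_eq arr 0 0 false 0 0 0 rfl le_rfl le_rfl (by ring) (fun _ => ⟨rfl, rfl⟩)
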